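-- pv_equiv track=rewrite | github.com/luuconghoangnam/graplite-scan | tools/graplite_scan.py | should_ignore_rel
-- ===== SOURCE A (Python) =====
-- from typing import Any, Dict, Iterable, List, Optional, Sequence, Set, Tuple
--
-- def normalize_rel_prefix(value: str) -> str:
--     value = value.strip().replace('\\', '/').strip('/')
--     return value
--
-- def should_ignore_rel(rel_posix: str, ignore_paths: Sequence[str]) -> bool:
--     for prefix in ignore_paths:
--         normalized = normalize_rel_prefix(prefix)
--         if not normalized:
--             continue
--         if rel_posix == normalized or rel_posix.startswith(normalized + '/'):
--             return True
--     return False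
-- ===== SOURCE B (Python) =====
-- from typing import Sequence
--
--
-- def normalize_rel_prefix(value: str) -> str:
--     value = value.strip().replace('\\', '/').strip('/')
--     return value
--
--
-- def should_ignore_rel(rel_posix: str, ignore_paths: Sequence[str]) -> bool:
--     # Build the set of non-empty normalized prefixes once, then make ONE pass
--     # over rel_posix, testing each '/'-boundary ancestor (and finally the whole
--     # path) by set membership.  The empty string is never in the set, so empty
--     # candidates can never match.
--     prefixes = {n for n in (normalize_rel_prefix(p) for p in ignore_paths) if n}
--     cand = ""
--     for ch in rel_posix:
--         if ch == '/' and cand in prefixes: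
--             return True
--         cand += ch
--     return cand in prefixes
-- ===== Notes on version B (the rewrite author's own statement) =====
-- stated objective: alternative
-- what changed: A scans ignore_paths and tests each normalized prefix against rel_posix with equality/startswith; B builds the set of non-empty normalized prefixes once and makes a single character pass over rel_posix, checking each '/'-boundary ancestor (and finally the whole path) by set membership.
import Mathlib
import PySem

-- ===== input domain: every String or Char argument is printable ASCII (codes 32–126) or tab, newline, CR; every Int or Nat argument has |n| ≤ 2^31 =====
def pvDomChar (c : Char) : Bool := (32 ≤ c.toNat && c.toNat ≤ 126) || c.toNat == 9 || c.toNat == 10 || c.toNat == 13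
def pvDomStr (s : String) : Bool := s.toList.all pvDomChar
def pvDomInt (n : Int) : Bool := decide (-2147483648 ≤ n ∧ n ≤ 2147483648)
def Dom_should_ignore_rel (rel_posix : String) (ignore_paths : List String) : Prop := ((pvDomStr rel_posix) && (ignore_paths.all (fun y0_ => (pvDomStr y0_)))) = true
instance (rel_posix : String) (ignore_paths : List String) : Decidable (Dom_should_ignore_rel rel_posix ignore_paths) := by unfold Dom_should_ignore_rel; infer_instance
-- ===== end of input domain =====

-- B replaces A's per-prefix startswith scan by one set of normalized prefixes and a
-- single left-to-right pass over rel_posix testing each '/'-boundary ancestor by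
-- set membership (objective: alternative).

-- ===== PORT A =====
-- shared module helper (used verbatim by both Pythons)
def normalize_rel_prefix (value : String) : String :=
  PySem.Str.stripChars (PySem.Str.replace (PySem.Str.strip value) "\\" "/") "/"

def should_ignore_rel (rel_posix : String) (ignore_paths : List String) : Bool :=
  match ignore_paths with
  | [] => false
  | prefix_ :: rest =>
    let normalized := normalize_rel_prefix prefix_
    if normalized = "" then should_ignore_rel rel_posix rest
    else if rel_posix == normalized || PySem.Str.startswith rel_posix (normalized ++ "/") then
      true
    else should_ignore_rel rel_posix rest

-- ===== PORT B =====
-- the set comprehension of Source B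
def pvAltPrefixes (ignore_paths : List String) : PySem.Set String :=
  PySem.Set.ofList ((ignore_paths.map normalize_rel_prefix).filter (fun n => n ≠ ""))

-- the character loop of Source B (cand grows by push; early return True at a matching '/')
def pvAltLoop (prefixes : PySem.Set String) (cand : String) : List Char → Bool
  | [] => prefixes.contains cand
  | ch :: rest =>
    if (ch == '/') && prefixes.contains cand then true
    else pvAltLoop prefixes (cand.push ch) rest

def should_ignore_rel_alt (rel_posix : String) (ignore_paths : List String) : Bool :=
  pvAltLoop (pvAltPrefixes ignore_paths) "" rel_posix.toList

-- ===== PRECONDITION & SPEC =====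
def Spec_should_ignore_rel (rel_posix : String) (ignore_paths : List String) (out : Bool) : Prop := out = should_ignore_rel_alt rel_posix ignore_paths
instance (rel_posix : String) (ignore_paths : List String) (out : Bool) : Decidable (Spec_should_ignore_rel rel_posix ignore_paths out) := by unfold Spec_should_ignore_rel; infer_instance

-- ===== CLAIM (what is proved, stated in full; the proofs are below) =====
def Claim_equal_should_ignore_rel : Prop := ∀ (rel_posix : String) (ignore_paths : List String), Dom_should_ignore_rel rel_posix ignore_paths → Spec_should_ignore_rel rel_posix ignore_paths (should_ignore_rel rel_posix ignore_paths)

-- ===== LEMMAS AND PROOFS =====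

/-- Characterization of the A-side loop: it finds a path in `ignore_paths` whose
nonempty normalization equals `rel` or is a `'/'`-boundary prefix of it. -/
theorem pvA_iff (rel : String) : ∀ (ips : List String),
    should_ignore_rel rel ips = true ↔
      ∃ p ∈ ips, normalize_rel_prefix p ≠ "" ∧
        (rel = normalize_rel_prefix p ∨
          ((normalize_rel_prefix p).toList ++ ['/']) <+: rel.toList) := by
  intro ips
  induction ips with
  | nil => simp [should_ignore_rel]
  | cons p rest ih =>
    by_cases h0 : normalize_rel_prefix p = ""
    · have hstep : should_ignore_rel rel (p :: rest) = should_ignore_rel rel rest := by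
        rw [should_ignore_rel]; simp only [h0, reduceIte]
      rw [hstep, ih]
      constructor
      · rintro ⟨q, hq, h⟩; exact ⟨q, List.mem_cons_of_mem _ hq, h⟩
      · rintro ⟨q, hq, hne, h⟩
        rcases List.mem_cons.mp hq with rfl | hq
        · exact absurd h0 hne
        · exact ⟨q, hq, hne, h⟩
    · have hstep : should_ignore_rel rel (p :: rest)
          = (if (rel == normalize_rel_prefix p
              || PySem.Str.startswith rel (normalize_rel_prefix p ++ "/")) then true
             else should_ignore_rel rel rest) := by
        rw [should_ignore_rel]; simp only [h0, reduceIte]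
      rw [hstep]
      by_cases hm : rel = normalize_rel_prefix p ∨
          ((normalize_rel_prefix p).toList ++ ['/']) <+: rel.toList
      · have hcond : (rel == normalize_rel_prefix p
            || PySem.Str.startswith rel (normalize_rel_prefix p ++ "/")) = true := by
          rcases hm with hm | hm
          · simp [hm]
          · simp only [Bool.or_eq_true, beq_iff_eq, PySem.Str.startswith_eq]
            refine Or.inr ?_
            rw [PySem.Chars.startswith_iff]
            simpa using hm
        rw [if_pos hcond]
        exact Iff.intro (fun _ => ⟨p, List.mem_cons_self, h0, hm⟩) (fun _ => rfl)
      · have hcond : (rel == normalize_rel_prefix p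
            || PySem.Str.startswith rel (normalize_rel_prefix p ++ "/")) = false := by
          rw [Bool.or_eq_false_iff]
          constructor
          · exact beq_eq_false_iff_ne.mpr (fun h => hm (Or.inl h))
          · rw [Bool.eq_false_iff]
            intro hsw
            apply hm; right
            simp only [PySem.Str.startswith_eq, PySem.Chars.startswith_iff] at hsw
            simpa using hsw
        rw [hcond, if_neg (by simp)]
        rw [ih]
        constructor
        · rintro ⟨q, hq, h⟩; exact ⟨q, List.mem_cons_of_mem _ hq, h⟩
        · rintro ⟨q, hq, hne, h⟩
          rcases List.mem_cons.mp hq with rfl | hq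
          · exact absurd h hm
          · exact ⟨q, hq, hne, h⟩

/-- Characterization of the B-side loop: it accepts iff some candidate — the whole
remaining suffix or a truncation at a `'/'` — together with `cand` lies in the set. -/
theorem pvLoop_iff (P : PySem.Set String) : ∀ (cs : List Char) (cand : String),
    pvAltLoop P cand cs = true ↔
      ∃ t : List Char, (t = cs ∨ (t ++ ['/']) <+: cs) ∧
        P.contains (String.ofList (cand.toList ++ t)) = true := by
  intro cs
  induction cs with
  | nil =>
    intro cand
    rw [pvAltLoop]
    constructor
    · intro h
      exact ⟨[], Or.inl rfl, by simpa using h⟩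
    · rintro ⟨t, ht, hc⟩
      rcases ht with rfl | hpre
      · simpa using hc
      · have := hpre.length_le; simp at this
  | cons c rest ih =>
    intro cand
    rw [pvAltLoop]
    by_cases h : ((c == '/') && P.contains cand) = true
    · rw [if_pos h]
      rw [Bool.and_eq_true, beq_iff_eq] at h
      refine Iff.intro (fun _ => ?_) (fun _ => rfl)
      refine ⟨[], Or.inr ⟨rest, by simp [h.1]⟩, by simpa using h.2⟩
    · rw [if_neg h, ih]
      constructor
      · rintro ⟨t, ht, hc⟩
        refine ⟨c :: t, ?_, by simpa using hc⟩
        rcases ht with rfl | hpre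
        · exact Or.inl rfl
        · exact Or.inr (by simpa [List.cons_prefix_cons] using hpre)
      · rintro ⟨t', ht', hc⟩
        rcases t' with _ | ⟨a, t⟩
        · rcases ht' with h1 | h1
          · exact absurd h1 (by simp)
          · exfalso
            apply h
            rw [Bool.and_eq_true, beq_iff_eq]
            have hca : c = '/' := by
              rcases h1 with ⟨u, hu⟩
              simpa using congrArg (fun l => l.head?) hu.symm
            exact ⟨hca, by simpa using hc⟩
        · have hac : a = c ∧ (t = rest ∨ (t ++ ['/']) <+: rest) := by
            rcases ht' with h1 | h1
            · exact ⟨(List.cons.injEq .. ▸ h1).1, Or.inl (List.cons.injEq .. ▸ h1).2⟩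
            · rw [List.cons_append, List.cons_prefix_cons] at h1
              exact ⟨h1.1, Or.inr h1.2⟩
          refine ⟨t, hac.2, ?_⟩
          rw [hac.1] at hc
          simpa using hc

/-- Membership in B's prefix set. -/
theorem pvContains_iff (ips : List String) (s : String) :
    (pvAltPrefixes ips).contains s = true ↔
      ∃ p ∈ ips, normalize_rel_prefix p = s ∧ s ≠ "" := by
  unfold pvAltPrefixes
  rw [PySem.Set.contains, List.contains_iff_mem, PySem.Set.mem_ofList]
  simp only [List.mem_filter, List.mem_map, decide_eq_true_eq]
  constructor
  · rintro ⟨⟨p, hp, rfl⟩, hne⟩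
    exact ⟨p, hp, rfl, hne⟩
  · rintro ⟨p, hp, rfl, hne⟩
    exact ⟨⟨p, hp, rfl⟩, hne⟩

-- ===== VERDICT (by name: the statement is the Claim_ definition above) =====
theorem should_ignore_rel_spec : Claim_equal_should_ignore_rel := by
  intro rel ips _
  unfold Spec_should_ignore_rel
  rw [Bool.eq_iff_iff, pvA_iff]
  unfold should_ignore_rel_alt
  rw [pvLoop_iff]
  constructor
  · rintro ⟨p, hp, hne, hm⟩
    refine ⟨(normalize_rel_prefix p).toList, ?_, ?_⟩
    · rcases hm with hm | hm
      · exact Or.inl (by rw [hm])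
      · exact Or.inr hm
    · rw [pvContains_iff]
      exact ⟨p, hp, by simp, by simpa using hne⟩
  · rintro ⟨t, ht, hc⟩
    rw [pvContains_iff] at hc
    rcases hc with ⟨p, hp, hnorm, hne⟩
    simp only [String.toList_empty, List.nil_append] at hnorm hne
    have htl : (normalize_rel_prefix p).toList = t := by
      rw [hnorm]; exact String.toList_ofList
    refine ⟨p, hp, by rw [hnorm]; exact hne, ?_⟩
    rcases ht with rfl | hpre
    · exact Or.inl (String.toList_inj.mp htl).symm
    · exact Or.inr (by rw [htl]; exact hpre)
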